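-- pv_equiv track=rewrite | github.com/lunamancebo/Assessment-Mitigation-Bias | Twitter/Word Embeddings/word_embeddings.py | num_occurences
-- ===== SOURCE A (Python) =====
-- def num_occurences(lista,num):
--     aux_dict = {}
--     for item in lista:
--         if item in aux_dict.keys():
--             aux_dict[item] += 1
--         else:
--             aux_dict[item] = 1
--
--     try:
--         idx = list(aux_dict.values()).index(num)
--         words = list(aux_dict.keys())[idx]
--         return len(words)
--     except:
--         return 0
-- ===== SOURCE B (Python) =====
-- def num_occurences(lista, num):
--     seen = set()
--     for item in lista:
--         if item not in seen:
--             if lista.count(item) == num: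
--                 return len(item)
--             seen.add(item)
--     return 0
-- ===== Notes on version B (the rewrite author's own statement) =====
-- stated objective: simpler
-- what changed: Replaces the count-dictionary plus list(values).index(num)/keys-indexing/try-except with a direct single scan that tests each first-occurrence word's lista.count against num and returns its length immediately.
import Mathlib
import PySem

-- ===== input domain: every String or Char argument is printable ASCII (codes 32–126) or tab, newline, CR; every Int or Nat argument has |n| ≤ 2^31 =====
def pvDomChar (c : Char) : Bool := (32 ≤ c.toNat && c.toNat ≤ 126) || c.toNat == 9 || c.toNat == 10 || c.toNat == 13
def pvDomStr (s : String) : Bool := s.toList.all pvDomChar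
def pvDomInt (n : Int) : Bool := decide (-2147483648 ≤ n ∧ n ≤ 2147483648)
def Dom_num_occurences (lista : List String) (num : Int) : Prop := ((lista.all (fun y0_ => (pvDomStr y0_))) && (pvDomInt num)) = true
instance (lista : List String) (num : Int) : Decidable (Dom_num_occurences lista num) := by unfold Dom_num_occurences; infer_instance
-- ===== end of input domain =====

-- B replaces A's count dictionary + values().index(num) + keys()[idx] lookup with one direct
-- scan over the list (skipping already-seen words via a set, testing lista.count(item) == num):
-- simpler, no intermediate dict, same result.

-- ===== PORT A =====
-- the counting loop 'for item in lista: ...' building aux_dict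
def pvAuxDict (lista : List String) : PySem.Dict String Int :=
  lista.foldl (fun d item =>
    if d.contains item then d.insert item (d.getD item 0 + 1)
    else d.insert item 1) PySem.Dict.empty

def num_occurences (lista : List String) (num : Int) : Int :=
  -- try: idx = list(values).index(num); words = list(keys)[idx]; return len(words); except: return 0
  match PySem.List.index? (pvAuxDict lista).values num with
  | some idx =>
    match PySem.List.pyGet? (pvAuxDict lista).keys (idx : Int) with
    | some words => PySem.Str.len words
    | none => 0
  | none => 0

-- ===== PORT B =====
def numOccLoop (lista : List String) (num : Int) : List String → PySem.Set String → Int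
  | [], _ => 0
  | item :: rest, seen =>
    if !(PySem.Set.contains seen item) then
      if (PySem.List.count lista item : Int) == num then PySem.Str.len item
      else numOccLoop lista num rest (PySem.Set.add seen item)
    else numOccLoop lista num rest seen

def num_occurences_alt (lista : List String) (num : Int) : Int :=
  numOccLoop lista num lista PySem.Set.empty

-- ===== PRECONDITION & SPEC =====
def Spec_num_occurences (lista : List String) (num : Int) (out : Int) : Prop := out = num_occurences_alt lista num
instance (lista : List String) (num : Int) (out : Int) : Decidable (Spec_num_occurences lista num out) := by unfold Spec_num_occurences; infer_instance

-- ===== CLAIM (what is proved, stated in full; the proofs are below) =====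
def Claim_equal_num_occurences : Prop := ∀ (lista : List String) (num : Int), Dom_num_occurences lista num → Spec_num_occurences lista num (num_occurences lista num)

-- ===== LEMMAS AND PROOFS =====

-- Common normal form: length of the first element of l satisfying p, else 0.
def pvFindLen (p : String → Bool) (l : List String) : Int :=
  match l.find? p with
  | some x => PySem.Str.len x
  | none => 0

-- the predicate both programs effectively test
def pvP (lista : List String) (num : Int) : String → Bool :=
  fun x => (List.count x lista : Int) == num

-- the predicate of B's scan relative to a seen-set
def pvQ (p : String → Bool) (s : PySem.Set String) : String → Bool :=
  fun y => !(decide (y ∈ s)) && p y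

theorem pv_getD_zero_of_not_contains (d : PySem.Dict String Int) (x : String)
    (h : d.contains x = false) : d.getD x 0 = 0 := by
  have hf : List.find? (fun p => p.1 == x) d.items = none := by
    rw [List.find?_eq_none]
    intro a ha
    simp [PySem.Dict.contains] at h
    simpa using h a.1 a.2 (by simpa using ha)
  simp [PySem.Dict.getD, PySem.Dict.get?, hf]

theorem pv_auxDict_eq_counter (lista : List String) :
    pvAuxDict lista = PySem.Dict.counter lista := by
  rw [pvAuxDict, ← PySem.Dict.foldl_insert_getD_add_one_eq_counter]
  congr 1
  funext d item
  by_cases h : d.contains item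
  · simp [h]
  · simp only [Bool.not_eq_true] at h
    simp [h, pv_getD_zero_of_not_contains d item h]

-- A's index-into-keys computation, over any key list l, is pvFindLen of "count == num" on l.
theorem pv_matchA (lista : List String) (num : Int) : ∀ (l : List String),
    (match PySem.List.index? (l.map (fun k => (List.count k lista : Int))) num with
     | some idx =>
       match PySem.List.pyGet? l (idx : Int) with
       | some words => PySem.Str.len words
       | none => 0
     | none => 0) = pvFindLen (pvP lista num) l := by
  intro l
  induction l with
  | nil => simp [pvFindLen]
  | cons x xs ih =>
    by_cases h : (List.count x lista : Int) = num
    · rw [List.map_cons, h, PySem.List.index?_cons_self]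
      have h0 : PySem.List.pyGet? (x :: xs) ((0 : Nat) : Int) = some x := by
        rw [PySem.List.pyGet?_natCast]; rfl
      have hp : pvP lista num x = true := by simp [pvP, h]
      rw [pvFindLen, List.find?_cons_of_pos hp]
      simpa using h0
    · rw [List.map_cons, PySem.List.index?_cons_of_ne _ h]
      have hp : pvP lista num x = false := by simp [pvP]; exact h
      have hR : pvFindLen (pvP lista num) (x :: xs) = pvFindLen (pvP lista num) xs := by
        rw [pvFindLen, List.find?_cons_of_neg (ne_true_of_eq_false hp), pvFindLen]
      rw [hR, ← ih]
      cases hix : PySem.List.index? (xs.map (fun k => (List.count k lista : Int))) num with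
      | none => simp
      | some k =>
        obtain ⟨hk, -, -⟩ := PySem.List.getElem_of_index?_eq_some hix
        rw [List.length_map] at hk
        have hget : PySem.List.pyGet? (x :: xs) ((k + 1 : Nat) : Int) = xs[k]? := by
          rw [PySem.List.pyGet?_natCast]; simp
        have hget' : PySem.List.pyGet? xs ((k : Nat) : Int) = xs[k]? :=
          PySem.List.pyGet?_natCast xs k
        simp only [Option.map_some, hget, hget']

-- find? over a foldl of Set.add: the already-seen part first, then the unseen-filtered rest.
theorem pv_find_foldl_add (p : String → Bool) : ∀ (l : List String) (s : PySem.Set String),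
    ((l.foldl PySem.Set.add s).find? p) =
      (s.find? p).or (l.find? (pvQ p s)) := by
  intro l
  induction l with
  | nil => intro s; simp
  | cons x xs ih =>
    intro s
    by_cases hx : x ∈ s
    · have hadd : PySem.Set.add s x = s := by
        simp [PySem.Set.add, PySem.Set.contains, List.contains_eq_mem, hx]
      have hq : pvQ p s x = false := by simp [pvQ, hx]
      rw [List.foldl_cons, hadd, ih s, List.find?_cons_of_neg (ne_true_of_eq_false hq)]
    · have hadd : PySem.Set.add s x = s ++ [x] := by
        simp [PySem.Set.add, PySem.Set.contains, List.contains_eq_mem, hx]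
      rw [List.foldl_cons, hadd, ih (s ++ [x]), List.find?_append]
      by_cases hpx : p x
      · have h1 : List.find? p [x] = some x := List.find?_cons_of_pos hpx
        have hq : pvQ p s x = true := by simp [pvQ, hx, hpx]
        rw [h1, List.find?_cons_of_pos hq]
        cases s.find? p <;> simp
      · simp only [Bool.not_eq_true] at hpx
        have h1 : List.find? p [x] = none := by
          rw [List.find?_cons_of_neg (ne_true_of_eq_false hpx)]; rfl
        rw [h1, Option.or_none]
        have hcong : pvQ p (s ++ [x]) = pvQ p s := by
          funext y
          by_cases hy : y = x
          · subst hy; simp [pvQ, hpx]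
          · simp [pvQ, hy]
        have hq : pvQ p s x = false := by simp [pvQ, hpx]
        rw [hcong, List.find?_cons_of_neg (ne_true_of_eq_false hq)]

-- B's loop is the find?-with-seen scan.
theorem pv_loopB (lista : List String) (num : Int) : ∀ (rest : List String) (seen : PySem.Set String),
    numOccLoop lista num rest seen =
      (match rest.find? (pvQ (pvP lista num) seen) with
       | some x => PySem.Str.len x
       | none => 0) := by
  intro rest
  induction rest with
  | nil => intro seen; simp [numOccLoop]
  | cons x xs ih =>
    intro seen
    rw [numOccLoop]
    by_cases hx : x ∈ seen
    · have hc : PySem.Set.contains seen x = true := by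
        simp [PySem.Set.contains, List.contains_eq_mem, hx]
      have hq : pvQ (pvP lista num) seen x = false := by simp [pvQ, hx]
      rw [hc, List.find?_cons_of_neg (ne_true_of_eq_false hq)]
      simpa using ih seen
    · have hc : PySem.Set.contains seen x = false := by
        simp [PySem.Set.contains, List.contains_eq_mem, hx]
      rw [hc]
      by_cases hpx : (List.count x lista : Int) = num
      · have hb : ((PySem.List.count lista x : Int) == num) = true := by
          simp [PySem.List.count_eq, hpx]
        have hq : pvQ (pvP lista num) seen x = true := by
          simp [pvQ, pvP, hx, hpx]
        rw [List.find?_cons_of_pos hq]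
        simp [PySem.List.count_eq, hpx]
      · have hb : ((PySem.List.count lista x : Int) == num) = false := by
          simp [PySem.List.count_eq]; exact hpx
        have hq : pvQ (pvP lista num) seen x = false := by
          simp [pvQ, pvP]; intro _; exact hpx
        rw [List.find?_cons_of_neg (ne_true_of_eq_false hq)]
        have hcong : pvQ (pvP lista num) (PySem.Set.add seen x) = pvQ (pvP lista num) seen := by
          funext y
          by_cases hy : y = x
          · subst hy
            have : pvP lista num y = false := by simp [pvP]; exact hpx
            simp [pvQ, this]
          · have hmem : (y ∈ PySem.Set.add seen x) ↔ y ∈ seen :=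
              by rw [PySem.Set.mem_add]; simp [hy]
            simp [pvQ, hmem]
        rw [← hcong, ← ih (PySem.Set.add seen x)]
        simp [PySem.List.count_eq, hpx]

-- ===== VERDICT (by name: the statement is the Claim_ definition above) =====
theorem num_occurences_spec : Claim_equal_num_occurences := by
  intro lista num _
  unfold Spec_num_occurences num_occurences num_occurences_alt
  rw [pv_auxDict_eq_counter]
  have hkeys : (PySem.Dict.counter lista).keys = PySem.Set.ofList lista :=
    PySem.Dict.keys_counter lista
  have hvals : (PySem.Dict.counter lista).values
      = (PySem.Set.ofList lista).map (fun k => (List.count k lista : Int)) := by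
    show ((PySem.Dict.counter lista).items.map (·.2)) = _
    rw [PySem.Dict.items_counter, List.map_map]
    rfl
  rw [hkeys, hvals, pv_matchA lista num (PySem.Set.ofList lista)]
  rw [pv_loopB lista num lista PySem.Set.empty]
  rw [pvFindLen, PySem.Set.ofList_eq_foldl]
  rw [show List.foldl PySem.Set.add [] lista = List.foldl PySem.Set.add PySem.Set.empty lista from rfl]
  rw [pv_find_foldl_add (pvP lista num) lista PySem.Set.empty]
  simp
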